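-- pv_equiv track=rewrite | github.com/ArsenicMeatball/botsynthesis | biobrick_optimization_tool_synthesis/optimization/logic/string_manipulation.py | find_number_of_non_overlapping_repeats
-- ===== SOURCE A (Python) =====
-- def find_number_of_non_overlapping_repeats(string: str, min_repeat_size=10):
--     if min_repeat_size < 1:
--         raise ArithmeticError("Can't find repeats smaller than 1")
--     if len(string) < min_repeat_size:
--         return 0
--     tracker = set()
--     result = 0
--     for idx in range(len(string) - min_repeat_size):
--         substring = string[idx:idx + min_repeat_size]
--         if substring not in tracker:
--             tracker.add(substring)
--             result += string.count(substring) - 1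
--     return result
-- ===== SOURCE B (Python) =====
-- def find_number_of_non_overlapping_repeats(string: str, min_repeat_size=10):
--     if min_repeat_size < 1:
--         raise ArithmeticError("Can't find repeats smaller than 1")
--     n = len(string)
--     if n < min_repeat_size:
--         return 0
--     groups = {}
--     for idx in range(n - min_repeat_size + 1):
--         groups.setdefault(string[idx:idx + min_repeat_size], []).append(idx)
--     total = 0
--     for starts in groups.values():
--         selected = 0
--         next_free = 0
--         for i in starts:
--             if next_free <= i:
--                 selected += 1
--                 next_free = i + min_repeat_size
--         total += selected - 1
--     return total
-- ===== Notes on version B (the rewrite author's own statement) =====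
-- stated objective: faster
-- what changed: Instead of re-scanning the whole string with string.count for every newly seen window (O(n^2*L)), B buckets all window start positions into a dict in one pass and counts greedy non-overlapping occurrences per distinct window from its sorted position list (O(n*L) average).
import Mathlib
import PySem

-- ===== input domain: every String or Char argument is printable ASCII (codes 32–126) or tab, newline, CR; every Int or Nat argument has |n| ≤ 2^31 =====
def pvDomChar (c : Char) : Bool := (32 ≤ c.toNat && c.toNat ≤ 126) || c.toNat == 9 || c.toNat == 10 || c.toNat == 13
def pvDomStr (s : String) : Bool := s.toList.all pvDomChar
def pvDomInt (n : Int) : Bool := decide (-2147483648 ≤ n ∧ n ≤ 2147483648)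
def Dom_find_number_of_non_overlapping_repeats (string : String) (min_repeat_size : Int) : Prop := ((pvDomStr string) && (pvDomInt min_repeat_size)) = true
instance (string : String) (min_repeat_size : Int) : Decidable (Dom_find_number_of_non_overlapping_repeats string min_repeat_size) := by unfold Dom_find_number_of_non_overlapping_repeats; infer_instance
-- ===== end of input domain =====

-- B replaces A's per-new-window rescan of the whole string (string.count) by one pass that buckets
-- window start positions per distinct window and counts greedy non-overlapping occurrences per bucket (faster).


-- ===== PORT A =====
def find_number_of_non_overlapping_repeats (string : String) (min_repeat_size : Int) : Int :=
  if min_repeat_size < 1 then 0   -- Python raises ArithmeticError here; excluded by Pre_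
  else if PySem.Str.len string < min_repeat_size then 0
  else
    ((PySem.List.pyRange 0 (PySem.Str.len string - min_repeat_size) 1).foldl
      (fun (st : PySem.Set String × Int) idx =>
        let substring := PySem.Str.slice string (some idx) (some (idx + min_repeat_size))
        if PySem.Set.contains st.1 substring then st
        else (PySem.Set.add st.1 substring, st.2 + ((PySem.Str.count string substring : Int) - 1)))
      (PySem.Set.empty, 0)).2

-- ===== PORT B =====
def find_number_of_non_overlapping_repeats_alt (string : String) (min_repeat_size : Int) : Int :=
  if min_repeat_size < 1 then 0   -- Python raises ArithmeticError here; excluded by Pre_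
  else if PySem.Str.len string < min_repeat_size then 0
  else
    let groups : PySem.Dict String (List Int) :=
      (PySem.List.pyRange 0 (PySem.Str.len string - min_repeat_size + 1) 1).foldl
        (fun d idx => d.modify (PySem.Str.slice string (some idx) (some (idx + min_repeat_size))) [] (fun l => l ++ [idx]))
        PySem.Dict.empty
    groups.values.foldl
      (fun total starts =>
        total + ((starts.foldl (fun (st : Int × Int) i =>
            if st.2 ≤ i then (st.1 + 1, i + min_repeat_size) else st) (0, 0)).1 - 1))
      0

-- ===== PRECONDITION & SPEC =====
-- Pre_ excludes exactly min_repeat_size < 1, where Python A raises ArithmeticError.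
def Pre_find_number_of_non_overlapping_repeats (string : String) (min_repeat_size : Int) : Prop := 1 ≤ min_repeat_size
instance (string : String) (min_repeat_size : Int) : Decidable (Pre_find_number_of_non_overlapping_repeats string min_repeat_size) := by unfold Pre_find_number_of_non_overlapping_repeats; infer_instance
def pvWitness_find_number_of_non_overlapping_repeats : String × Int := ("abcabcab", 3)
def Spec_find_number_of_non_overlapping_repeats (string : String) (min_repeat_size : Int) (out : Int) : Prop := out = find_number_of_non_overlapping_repeats_alt string min_repeat_size
instance (string : String) (min_repeat_size : Int) (out : Int) : Decidable (Spec_find_number_of_non_overlapping_repeats string min_repeat_size out) := by unfold Spec_find_number_of_non_overlapping_repeats; infer_instance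

-- ===== CLAIM (what is proved, stated in full; the proofs are below) =====
def Claim_equal_find_number_of_non_overlapping_repeats : Prop := ∀ (string : String) (min_repeat_size : Int), Dom_find_number_of_non_overlapping_repeats string min_repeat_size → Pre_find_number_of_non_overlapping_repeats string min_repeat_size → Spec_find_number_of_non_overlapping_repeats string min_repeat_size (find_number_of_non_overlapping_repeats string min_repeat_size)

-- ===== LEMMAS AND PROOFS =====

-- the window of length m starting at index i, as both ports compute it
def pvWin (s : String) (m : Int) (i : Int) : String :=
  PySem.Str.slice s (some i) (some (i + m))

-- greedy non-overlapping count over an increasing list of candidate positions, threshold t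
def pvGl (L : Nat) : List Nat → Nat → Nat
  | [], _ => 0
  | i :: ps, t => if t ≤ i then 1 + pvGl L ps (i + L) else pvGl L ps t

-- occurrence predicate: sub occurs at position i of cs
def pvP (cs sub : List Char) (i : Nat) : Bool := decide (sub <+: cs.drop i)

-- the sum both programs compute: Σ over the first k distinct windows of (count - 1)
def pvSum (s : String) (L k : Nat) : Int :=
  ((PySem.Set.ofList ((List.range k).map (fun j => pvWin s (L : Int) ((j : Nat) : Int)))).map
    (fun w => ((PySem.Str.count s w : Int) - 1))).sum

-- A's loop: the tracker-set fold sums f over the newly inserted distinct elements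
theorem pvFoldA (f : String → Int) (l : List String) (tr : PySem.Set String) (res : Int) :
    l.foldl (fun st x => if PySem.Set.contains st.1 x then st else (PySem.Set.add st.1 x, st.2 + f x)) (tr, res)
      = (PySem.Set.update tr l, res + ((PySem.Set.update tr l).map f).sum - ((tr.map f).sum)) := by
  induction l generalizing tr res with
  | nil => simp [PySem.Set.update]
  | cons x l ih =>
    by_cases hc : PySem.Set.contains tr x = true
    · have hadd : PySem.Set.add tr x = tr := by
        have hm : x ∈ tr := by simpa using hc
        simp [PySem.Set.add, hm]
      have hupd : PySem.Set.update tr (x :: l) = PySem.Set.update tr l := by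
        simp [PySem.Set.update, List.foldl, hadd]
      simp only [List.foldl, hc, if_pos, hupd]
      rw [ih]
    · have hadd : PySem.Set.add tr x = tr ++ [x] := by
        have hm : x ∉ tr := by simpa using hc
        simp [PySem.Set.add, hm]
      have hupd : PySem.Set.update tr (x :: l) = PySem.Set.update (tr ++ [x]) l := by
        simp [PySem.Set.update, List.foldl, hadd]
      simp only [List.foldl, hc, if_neg, Bool.false_eq_true, not_false_iff, hupd]
      rw [hadd, ih]
      simp
      ring

theorem pvGl_skip (L : Nat) (ps₁ ps₂ : List Nat) (t : Nat) (h : ∀ i ∈ ps₁, i < t) :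
    pvGl L (ps₁ ++ ps₂) t = pvGl L ps₂ t := by
  induction ps₁ with
  | nil => rfl
  | cons i ps ih =>
    have : ¬ t ≤ i := by have := h i (by simp); omega
    simp only [List.cons_append, pvGl, if_neg this]
    exact ih (fun j hj => h j (by simp [hj]))

theorem pvGl_congr (L : Nat) (ps : List Nat) (t t' : Nat) (h : ∀ i ∈ ps, (t ≤ i ↔ t' ≤ i)) :
    pvGl L ps t = pvGl L ps t' := by
  induction ps generalizing t t' with
  | nil => rfl
  | cons i ps ih =>
    by_cases hi : t ≤ i
    · have hi' : t' ≤ i := (h i (by simp)).1 hi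
      simp [pvGl, hi, hi']
    · have hi' : ¬ t' ≤ i := fun hx => hi ((h i (by simp)).2 hx)
      simp only [pvGl, if_neg hi, if_neg hi']
      exact ih t t' (fun j hj => h j (by simp [hj]))

-- the crux: Python's str.count scan equals the greedy count over the occurrence positions ≥ j
theorem pvGo_eq (sub cs : List Char) (hL : 1 ≤ sub.length) :
    ∀ fuel j acc, cs.length - j ≤ fuel →
      PySem.Chars.count.go sub fuel (cs.drop j) acc
        = acc + pvGl sub.length ((List.range' j (cs.length - j)).filter (pvP cs sub)) j := by
  intro fuel
  induction fuel with
  | zero =>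
    intro j acc hf
    have hj : cs.length ≤ j := by omega
    have hd : cs.drop j = [] := List.drop_eq_nil_of_le hj
    have hr : cs.length - j = 0 := by omega
    rw [hd, hr]
    simp [PySem.Chars.count.go, List.range', pvGl]
  | succ fuel ih =>
    intro j acc hf
    by_cases hj : cs.length ≤ j
    · have hd : cs.drop j = [] := List.drop_eq_nil_of_le hj
      have hr : cs.length - j = 0 := by omega
      rw [hd, hr]
      simp [PySem.Chars.count.go, List.range', pvGl]
    · rw [not_le] at hj
      have hd : cs.drop j = cs[j] :: cs.drop (j+1) := List.drop_eq_getElem_cons hj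
      by_cases hp : sub <+: cs.drop j
      · -- occurrence at j
        have hjL : j + sub.length ≤ cs.length := by
          have := hp.length_le
          simp [List.length_drop] at this
          omega
        have hstep : PySem.Chars.count.go sub (fuel+1) (cs.drop j) acc
            = PySem.Chars.count.go sub fuel (cs.drop (j + sub.length)) (acc+1) := by
          rw [hd]
          simp [PySem.Chars.count.go, hp]
        have hrec := ih (j + sub.length) (acc+1) (by omega)
        rw [hstep, hrec]
        have hPj : pvP cs sub j = true := by simp [pvP, hp]
        have hsplit : List.range' j (cs.length - j) = j :: List.range' (j+1) (cs.length - (j+1)) := by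
          have : cs.length - j = (cs.length - (j+1)) + 1 := by omega
          rw [this, List.range'_succ]
        have hsplit2 : List.range' (j+1) (cs.length - (j+1))
            = List.range' (j+1) (sub.length - 1) ++ List.range' (j + sub.length) (cs.length - (j + sub.length)) := by
          have h1 : (j+1) + 1 * (sub.length - 1) = j + sub.length := by omega
          have h2 : (sub.length - 1) + (cs.length - (j + sub.length)) = cs.length - (j+1) := by omega
          calc List.range' (j+1) (cs.length - (j+1))
              = List.range' (j+1) ((sub.length - 1) + (cs.length - (j + sub.length))) := by rw [h2]
            _ = List.range' (j+1) (sub.length - 1) ++ List.range' ((j+1) + 1 * (sub.length - 1)) (cs.length - (j + sub.length)) := (List.range'_append).symm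
            _ = _ := by rw [h1]
        rw [hsplit, List.filter_cons_of_pos hPj]
        simp only [pvGl, le_refl, if_pos]
        rw [hsplit2, List.filter_append, pvGl_skip]
        · omega
        · intro i hi
          have := List.mem_range'_1.mp (List.mem_of_mem_filter hi)
          omega
      · -- no occurrence at j
        have hstep : PySem.Chars.count.go sub (fuel+1) (cs.drop j) acc
            = PySem.Chars.count.go sub fuel (cs.drop (j+1)) acc := by
          rw [hd]
          simp [PySem.Chars.count.go, hp]
        have hrec := ih (j+1) acc (by omega)
        rw [hstep, hrec]
        have hPj : pvP cs sub j = false := by simp [pvP, hp]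
        have hsplit : List.range' j (cs.length - j) = j :: List.range' (j+1) (cs.length - (j+1)) := by
          have : cs.length - j = (cs.length - (j+1)) + 1 := by omega
          rw [this, List.range'_succ]
        rw [hsplit, List.filter_cons_of_neg (by simp [hPj])]
        congr 1
        apply pvGl_congr
        intro i hi
        have := List.mem_range'_1.mp (List.mem_of_mem_filter hi)
        omega

theorem pvCount_eq_gl (sub cs : List Char) (hL : 1 ≤ sub.length) :
    PySem.Chars.count cs sub = pvGl sub.length ((List.range cs.length).filter (pvP cs sub)) 0 := by
  have hne : sub.isEmpty = false := by
    cases sub with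
    | nil => simp at hL
    | cons a l => rfl
  have h := pvGo_eq sub cs hL cs.length 0 0 (by omega)
  simp only [List.drop_zero, Nat.sub_zero] at h
  rw [PySem.Chars.count, hne]
  simp only [Bool.false_eq_true, List.range_eq_range']
  simpa using h

-- occurrences only start at positions ≤ n - L
theorem pvFilter_range (sub cs : List Char) (hL : 1 ≤ sub.length) (hn : sub.length ≤ cs.length) :
    (List.range cs.length).filter (pvP cs sub)
      = (List.range (cs.length - sub.length + 1)).filter (pvP cs sub) := by
  have hsplit : List.range cs.length
      = List.range (cs.length - sub.length + 1) ++ List.range' (cs.length - sub.length + 1) (sub.length - 1) := by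
    rw [List.range_eq_range', List.range_eq_range']
    have h1 : 0 + 1 * (cs.length - sub.length + 1) = cs.length - sub.length + 1 := by omega
    have h2 : (cs.length - sub.length + 1) + (sub.length - 1) = cs.length := by omega
    calc List.range' 0 cs.length
        = List.range' 0 ((cs.length - sub.length + 1) + (sub.length - 1)) := by rw [h2]
      _ = List.range' 0 (cs.length - sub.length + 1) ++ List.range' (0 + 1 * (cs.length - sub.length + 1)) (sub.length - 1) := (List.range'_append).symm
      _ = _ := by rw [h1]
  rw [hsplit, List.filter_append]
  have : (List.range' (cs.length - sub.length + 1) (sub.length - 1)).filter (pvP cs sub) = [] := by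
    apply List.filter_eq_nil_iff.mpr
    intro i hi
    have hmem := List.mem_range'_1.mp hi
    simp only [pvP, decide_eq_true_eq]
    intro hp
    have := hp.length_le
    simp [List.length_drop] at this
    omega
  rw [this, List.append_nil]

theorem pvWin_toList (s : String) (L : Nat) (j : Nat) :
    (pvWin s (L : Int) ((j : Nat) : Int)).toList = (s.toList.drop j).take L := by
  simp [pvWin, pysem]

theorem pvWin_beq (s : String) (L : Nat) (j : Nat) (w : String) (hw : w.toList.length = L) :
    (pvWin s (L : Int) ((j : Nat) : Int) == w) = pvP s.toList w.toList j := by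
  rw [Bool.eq_iff_iff]
  simp only [beq_iff_eq, pvP, decide_eq_true_eq]
  constructor
  · intro h
    rw [List.prefix_iff_eq_take, hw]
    rw [← h, pvWin_toList]
  · intro h
    have h2 := (List.prefix_iff_eq_take.mp h)
    rw [hw] at h2
    exact String.toList_inj.mp (by rw [pvWin_toList, ← h2])

-- B's inner loop over the (cast) position list equals pvGl
theorem pvGreedy_eq_gl (L : Nat) (ps : List Nat) (c : Int) (t : Nat) :
    ((ps.map (fun i : Nat => (i : Int))).foldl
        (fun (st : Int × Int) i => if st.2 ≤ i then (st.1 + 1, i + (L : Int)) else st) (c, ((t : Nat) : Int))).1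
      = c + (pvGl L ps t : Int) := by
  induction ps generalizing c t with
  | nil => simp [pvGl]
  | cons i ps ih =>
    by_cases hi : t ≤ i
    · have hle : ((t : Nat) : Int) ≤ ((i : Nat) : Int) := by exact_mod_cast hi
      simp only [List.map, List.foldl, if_pos hle]
      have hc : ((i : Nat) : Int) + (L : Int) = (((i + L : Nat)) : Int) := by push_cast; ring
      rw [hc, ih]
      simp [pvGl, hi]
      ring
    · have hle : ¬ ((t : Nat) : Int) ≤ ((i : Nat) : Int) := by exact_mod_cast hi
      simp only [List.map, List.foldl, if_neg hle]
      rw [ih]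
      simp [pvGl, hi]

-- every member of the distinct-window set (k windows, k ≤ n - L + 1) has length exactly L
theorem pvWin_len (s : String) (L : Nat) (hn : L ≤ s.toList.length) (k : Nat)
    (hk : k ≤ s.toList.length - L + 1) (w : String)
    (hw : w ∈ PySem.Set.ofList ((List.range k).map (fun j => pvWin s (L : Int) ((j : Nat) : Int)))) :
    w.toList.length = L := by
  rw [PySem.Set.mem_ofList] at hw
  obtain ⟨j, hj, rfl⟩ := List.mem_map.mp hw
  rw [List.mem_range] at hj
  rw [pvWin_toList, List.length_take, List.length_drop]
  omega

-- the count of any window w (length L) of s, computed by B's greedy loop over w's start positions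
theorem pvKey_count (s : String) (L : Nat) (hL : 1 ≤ L) (hn : L ≤ s.toList.length)
    (w : String) (hw : w.toList.length = L) :
    ((((List.range (s.toList.length - L + 1)).map (fun j : Nat => (j : Int))).filter
          (fun i => PySem.Str.slice s (some i) (some (i + (L : Int))) == w)).foldl
        (fun (st : Int × Int) i => if st.2 ≤ i then (st.1 + 1, i + (L : Int)) else st) (0, 0)).1
      = (PySem.Chars.count s.toList w.toList : Int) := by
  rw [List.filter_map]
  have hfc : ((List.range (s.toList.length - L + 1)).filter
        ((fun i => PySem.Str.slice s (some i) (some (i + (L : Int))) == w) ∘ (fun j : Nat => (j : Int))))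
      = (List.range (s.toList.length - L + 1)).filter (pvP s.toList w.toList) := by
    apply List.filter_congr
    intro j _
    exact pvWin_beq s L j w hw
  rw [hfc]
  have h0 : (0 : Int) = ((0 : Nat) : Int) := rfl
  have := pvGreedy_eq_gl L ((List.range (s.toList.length - L + 1)).filter (pvP s.toList w.toList)) 0 0
  simp only [Nat.cast_zero] at this
  rw [this]
  rw [pvCount_eq_gl w.toList s.toList (by omega), pvFilter_range w.toList s.toList (by omega) (by omega), hw]
  ring

-- dropping the last window from the distinct-window sum does not change it:
-- a window first occurring at position n - L occurs exactly once, contributing count - 1 = 0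
theorem pvLastWindow (s : String) (L : Nat) (hL : 1 ≤ L) (hn : L ≤ s.toList.length) :
    pvSum s L (s.toList.length - L + 1) = pvSum s L (s.toList.length - L) := by
  set n := s.toList.length with hnn
  set k := n - L with hkk
  set wl := (List.range k).map (fun j => pvWin s (L : Int) ((j : Nat) : Int)) with hwl
  have hofl : PySem.Set.ofList ((List.range (k+1)).map (fun j => pvWin s (L : Int) ((j : Nat) : Int)))
      = PySem.Set.add (PySem.Set.ofList wl) (pvWin s (L : Int) ((k : Nat) : Int)) := by
    rw [List.range_succ, List.map_append]
    rw [PySem.Set.ofList_eq_foldl, List.foldl_append, ← PySem.Set.ofList_eq_foldl]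
    rfl
  unfold pvSum
  rw [hofl]
  by_cases hc : pvWin s (L : Int) ((k : Nat) : Int) ∈ PySem.Set.ofList wl
  · have : PySem.Set.add (PySem.Set.ofList wl) (pvWin s (L : Int) ((k : Nat) : Int)) = PySem.Set.ofList wl := by
      simp [PySem.Set.add, hc]
    rw [this, hwl]
  · have hadd : PySem.Set.add (PySem.Set.ofList wl) (pvWin s (L : Int) ((k : Nat) : Int))
        = PySem.Set.ofList wl ++ [pvWin s (L : Int) ((k : Nat) : Int)] := by
      simp [PySem.Set.add, hc]
    rw [hadd, List.map_append, List.sum_append]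
    have hcount : PySem.Chars.count s.toList (pvWin s (L : Int) ((k : Nat) : Int)).toList = 1 := by
      set w := pvWin s (L : Int) ((k : Nat) : Int) with hw
      have hlen : w.toList.length = L := by
        rw [hw, pvWin_toList, List.length_take, List.length_drop]
        omega
      rw [pvCount_eq_gl w.toList s.toList (by omega),
          pvFilter_range w.toList s.toList (by omega) (by omega), hlen]
      have hkn : n - L + 1 = k + 1 := by omega
      rw [hkn, List.range_succ, List.filter_append]
      have h1 : (List.range k).filter (pvP s.toList w.toList) = [] := by
        apply List.filter_eq_nil_iff.mpr
        intro j hj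
        rw [List.mem_range] at hj
        intro hPj
        have : (pvWin s (L : Int) ((j : Nat) : Int) == w) = true := by
          rw [pvWin_beq s L j w hlen]; exact hPj
        rw [beq_iff_eq] at this
        apply hc
        rw [PySem.Set.mem_ofList, hwl]
        exact this ▸ List.mem_map.mpr ⟨j, List.mem_range.mpr hj, rfl⟩
      have h2 : [k].filter (pvP s.toList w.toList) = [k] := by
        have hPk : pvP s.toList w.toList k = true := by
          simp only [pvP, decide_eq_true_eq]
          rw [hw, pvWin_toList]
          have : (s.toList.drop k).length = L := by rw [List.length_drop]; omega
          rw [List.take_of_length_le (by omega)]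
        simp [hPk]
      rw [h1, h2, List.nil_append]
      simp [pvGl]
    rw [← hwl]
    have hz : (List.map (fun w => ((PySem.Str.count s w : Int) - 1)) [pvWin s (L : Int) ((k : Nat) : Int)]).sum = 0 := by
      simp only [List.map_cons, List.map_nil, List.sum_cons, List.sum_nil]
      rw [PySem.Str.count_eq, hcount]
      simp
    rw [hz, add_zero]

-- A's port, in the main branch, computes pvSum over the first n - L windows
theorem pvA_main (s : String) (L : Nat) (hL : 1 ≤ L) (hn : L ≤ s.toList.length) :
    find_number_of_non_overlapping_repeats s (L : Int) = pvSum s L (s.toList.length - L) := by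
  unfold find_number_of_non_overlapping_repeats
  rw [if_neg (by omega : ¬ (L : Int) < 1), if_neg (by rw [PySem.Str.len_eq]; omega : ¬ PySem.Str.len s < (L : Int))]
  rw [PySem.Str.len_eq]
  have hcast : ((s.toList.length : Int) - (L : Int)) = (((s.toList.length - L : Nat)) : Int) := by
    omega
  rw [hcast, PySem.List.pyRange_zero_natCast]
  calc ((((List.range (s.toList.length - L)).map (fun k : Nat => (k : Int))).foldl
          (fun (st : PySem.Set String × Int) idx =>
            let substring := PySem.Str.slice s (some idx) (some (idx + (L : Int)))
            if PySem.Set.contains st.1 substring then st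
            else (PySem.Set.add st.1 substring, st.2 + ((PySem.Str.count s substring : Int) - 1)))
          (PySem.Set.empty, 0)).2)
      = (((List.range (s.toList.length - L)).map (fun j : Nat => pvWin s (L : Int) ((j : Nat) : Int))).foldl
          (fun (st : PySem.Set String × Int) x =>
            if PySem.Set.contains st.1 x then st
            else (PySem.Set.add st.1 x, st.2 + ((PySem.Str.count s x : Int) - 1)))
          (PySem.Set.empty, 0)).2 := by
        rw [List.foldl_map, List.foldl_map]
        rfl
    _ = pvSum s L (s.toList.length - L) := by
        rw [pvFoldA]
        have hupd : PySem.Set.update PySem.Set.empty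
            ((List.range (s.toList.length - L)).map (fun j : Nat => pvWin s (L : Int) ((j : Nat) : Int)))
            = PySem.Set.ofList ((List.range (s.toList.length - L)).map (fun j : Nat => pvWin s (L : Int) ((j : Nat) : Int))) := by
          rw [PySem.Set.ofList_eq_foldl]; rfl
        rw [hupd]
        unfold pvSum
        simp [PySem.Set.empty]

-- B's port, in the main branch, computes pvSum over all n - L + 1 windows
theorem pvB_main (s : String) (L : Nat) (hL : 1 ≤ L) (hn : L ≤ s.toList.length) :
    find_number_of_non_overlapping_repeats_alt s (L : Int) = pvSum s L (s.toList.length - L + 1) := by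
  unfold find_number_of_non_overlapping_repeats_alt
  rw [if_neg (by omega : ¬ (L : Int) < 1), if_neg (by rw [PySem.Str.len_eq]; omega : ¬ PySem.Str.len s < (L : Int))]
  rw [PySem.Str.len_eq]
  have hcast : ((s.toList.length : Int) - (L : Int) + 1) = (((s.toList.length - L + 1 : Nat)) : Int) := by
    omega
  rw [hcast, PySem.List.pyRange_zero_natCast]
  set K := s.toList.length - L + 1 with hK
  set idxs := (List.range K).map (fun j : Nat => (j : Int)) with hidxs
  set G := idxs.foldl
      (fun d idx => d.modify (PySem.Str.slice s (some idx) (some (idx + (L : Int)))) [] (fun l => l ++ [idx]))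
      PySem.Dict.empty with hGdef
  show (G.values.foldl
      (fun total starts =>
        total + ((starts.foldl (fun (st : Int × Int) i =>
            if st.2 ≤ i then (st.1 + 1, i + (L : Int)) else st) (0, 0)).1 - 1))
      0) = pvSum s L K
  have hG : G = (idxs.map (fun i => (PySem.Str.slice s (some i) (some (i + (L : Int))), i))).foldl
      (fun d p => d.modify p.1 [] (fun l => l ++ [p.2])) PySem.Dict.empty := by
    rw [hGdef]
    conv_rhs => rw [List.foldl_map]
  have hkeys : G.keys = PySem.Set.ofList ((List.range K).map (fun j : Nat => pvWin s (L : Int) ((j : Nat) : Int))) := by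
    have h := PySem.Dict.keys_foldl_modify_key idxs
      (fun i => PySem.Str.slice s (some i) (some (i + (L : Int)))) []
      (fun _d idx => fun l => l ++ [idx]) PySem.Dict.empty
    rw [PySem.Dict.keys_empty] at h
    rw [hGdef]
    rw [PySem.Set.ofList_eq_foldl]
    rw [hidxs, List.map_map] at h
    exact h
  have hnd : G.keys.Nodup := by
    rw [hGdef]
    exact PySem.Dict.nodup_keys_foldl_modify_key idxs _ [] _ PySem.Dict.empty PySem.Dict.nodup_keys_empty
  have hvals : G.values = G.keys.map (fun w => G.getD w []) := PySem.Dict.values_eq_map_keys G hnd []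
  have hgetD : ∀ w, G.getD w []
      = idxs.filter (fun i => PySem.Str.slice s (some i) (some (i + (L : Int))) == w) := by
    intro w
    rw [hG, PySem.Dict.getD_foldl_modify_append]
    simp [List.filter_map, List.map_map, Function.comp_def]
  rw [PySem.List.foldl_add, hvals, List.map_map]
  have hmap : (G.keys.map ((fun starts =>
        ((starts.foldl (fun (st : Int × Int) i =>
            if st.2 ≤ i then (st.1 + 1, i + (L : Int)) else st) (0, 0)).1 - 1)) ∘ (fun w => G.getD w [])))
      = G.keys.map (fun w => ((PySem.Str.count s w : Int) - 1)) := by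
    apply List.map_congr_left
    intro w hw
    have hwlen : w.toList.length = L := by
      apply pvWin_len s L hn K (by omega) w
      rw [← hkeys]
      exact hw
    simp only [Function.comp_def]
    rw [hgetD w, hidxs]
    rw [pvKey_count s L hL hn w hwlen, PySem.Str.count_eq]
  rw [hmap, hkeys]
  unfold pvSum
  simp

-- ===== VERDICT (by name: the statement is the Claim_ definition above) =====
theorem find_number_of_non_overlapping_repeats_spec : Claim_equal_find_number_of_non_overlapping_repeats := by
  intro s m _ hpre
  unfold Spec_find_number_of_non_overlapping_repeats
  unfold Pre_find_number_of_non_overlapping_repeats at hpre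
  by_cases hlen : PySem.Str.len s < m
  · have h1 : ¬ m < 1 := by omega
    have hlen' : (s.length : Int) < m := by
      rw [PySem.Str.len_eq] at hlen
      simpa using hlen
    simp [find_number_of_non_overlapping_repeats, find_number_of_non_overlapping_repeats_alt, h1, hlen']
  · have hm : m = ((m.toNat : Nat) : Int) := by omega
    have hL : 1 ≤ m.toNat := by omega
    have hn : m.toNat ≤ s.toList.length := by
      rw [not_lt, PySem.Str.len_eq] at hlen
      omega
    rw [hm, pvA_main s m.toNat hL hn, pvB_main s m.toNat hL hn, pvLastWindow s m.toNat hL hn]
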